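-- pv_equiv track=rewrite | github.com/ScientificArchisman/ClassScheduler | python/components/fitness_func.py | prerequisites_met
-- ===== SOURCE A (Python) =====
-- def prerequisites_met(schedule, prerequisites):
--     completed_courses = set()
--
--     for day in sorted(schedule.keys()):
--         time_slots = schedule[day]
--         for time_slot in sorted(time_slots.keys()):
--             course_id = time_slots[time_slot]
--
--             if course_id in prerequisites:
--                 for prereq in prerequisites[course_id]:
--                     if prereq not in completed_courses:
--                         return False
--
--             completed_courses.add(course_id)
--
--     return True
-- ===== SOURCE B (Python) =====
-- def prerequisites_met(schedule, prerequisites):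
--     # Build a rank table: each course -> index of its first occurrence in
--     # chronological (sorted day, then sorted time slot) order.
--     rank = {}
--     i = 0
--     for day in sorted(schedule.keys()):
--         slots = schedule[day]
--         for t in sorted(slots.keys()):
--             rank.setdefault(slots[t], i)
--             i += 1
--     # A schedule is valid iff every prerequisite of a scheduled course is
--     # itself scheduled strictly earlier (by first occurrence).
--     return all(p in rank and rank[p] < rank[c]
--                for c in rank if c in prerequisites
--                for p in prerequisites[c])
-- ===== Notes on version B (the rewrite author's own statement) =====
-- stated objective: alternative
-- what changed: Replaces A's single pass with a running completed-set by a first-occurrence rank table built over the chronological course stream plus a separate pass comparing prerequisite positions with strict '<'.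
import Mathlib
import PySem

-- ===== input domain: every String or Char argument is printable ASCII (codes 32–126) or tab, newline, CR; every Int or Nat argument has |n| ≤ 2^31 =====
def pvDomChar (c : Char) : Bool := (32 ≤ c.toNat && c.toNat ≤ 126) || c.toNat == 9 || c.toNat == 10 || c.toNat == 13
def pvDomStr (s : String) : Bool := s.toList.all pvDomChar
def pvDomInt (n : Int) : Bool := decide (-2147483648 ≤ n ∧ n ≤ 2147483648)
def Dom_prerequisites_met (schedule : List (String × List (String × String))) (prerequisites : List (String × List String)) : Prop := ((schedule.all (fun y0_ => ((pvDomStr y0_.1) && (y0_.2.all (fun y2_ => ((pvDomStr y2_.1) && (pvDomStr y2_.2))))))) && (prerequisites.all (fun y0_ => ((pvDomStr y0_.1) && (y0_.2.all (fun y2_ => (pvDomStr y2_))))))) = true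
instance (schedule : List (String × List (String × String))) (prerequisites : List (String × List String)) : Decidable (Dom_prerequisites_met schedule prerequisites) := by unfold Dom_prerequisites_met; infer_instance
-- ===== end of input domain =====

-- B replaces A's running completed-set check by a first-occurrence rank table and a
-- separate position-comparison pass (alternative decomposition, same asymptotic cost).

-- ===== PORT A =====
-- shared by both ports: the scheduled courses in chronological order
-- (sorted day, then sorted time slot) — both Pythons walk the schedule identically
def pmCourses (schedule : List (String × List (String × String))) : List String :=
  let sd := PySem.Dict.ofList (schedule.map (fun p => (p.1, PySem.Dict.ofList p.2)))
  (PySem.List.sorted sd.keys (fun x => x) false).flatMap (fun day =>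
    let ts := sd.getD day PySem.Dict.empty
    (PySem.List.sorted ts.keys (fun x => x) false).map (fun t => ts.getD t ""))

-- A's loop: check each course's prerequisites against the set of courses already seen
def pmLoopA (pd : PySem.Dict String (List String)) :
    List String → PySem.Set String → Bool
  | [], _ => true
  | c :: rest, completed =>
    match pd.get? c with
    | some ps =>
      if ps.all (fun p => PySem.Set.contains completed p)
      then pmLoopA pd rest (PySem.Set.add completed c)
      else false
    | none => pmLoopA pd rest (PySem.Set.add completed c)

def prerequisites_met (schedule : List (String × List (String × String))) (prerequisites : List (String × List String)) : Bool :=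
  pmLoopA (PySem.Dict.ofList prerequisites) (pmCourses schedule) PySem.Set.empty

-- ===== PORT B =====
-- rank.setdefault(c, i) over the course stream: course -> first-occurrence index
def pmRank : List String → Nat → PySem.Dict String Nat → PySem.Dict String Nat
  | [], _, d => d
  | c :: rest, i, d => pmRank rest (i + 1) (d.setdefault c i)

def prerequisites_met_alt (schedule : List (String × List (String × String))) (prerequisites : List (String × List String)) : Bool :=
  let pd := PySem.Dict.ofList prerequisites
  let rank := pmRank (pmCourses schedule) 0 PySem.Dict.empty
  rank.keys.all (fun c =>
    match pd.get? c with
    | some ps => ps.all (fun p => rank.contains p && decide (rank.getD p 0 < rank.getD c 0))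
    | none => true)

-- ===== PRECONDITION & SPEC =====
def Spec_prerequisites_met (schedule : List (String × List (String × String))) (prerequisites : List (String × List String)) (out : Bool) : Prop := out = prerequisites_met_alt schedule prerequisites
instance (schedule : List (String × List (String × String))) (prerequisites : List (String × List String)) (out : Bool) : Decidable (Spec_prerequisites_met schedule prerequisites out) := by unfold Spec_prerequisites_met; infer_instance

-- ===== CLAIM (what is proved, stated in full; the proofs are below) =====
def Claim_equal_prerequisites_met : Prop := ∀ (schedule : List (String × List (String × String))) (prerequisites : List (String × List String)), Dom_prerequisites_met schedule prerequisites → Spec_prerequisites_met schedule prerequisites (prerequisites_met schedule prerequisites)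

-- ===== LEMMAS AND PROOFS =====

theorem pmRank_get? (L : List String) : ∀ (i : Nat) (d : PySem.Dict String Nat) (x : String),
    (pmRank L i d).get? x =
      if d.contains x then d.get? x else (PySem.List.index? L x).map (fun j => i + j) := by
  induction L with
  | nil =>
    intro i d x
    by_cases h : d.contains x = true
    · simp [pmRank, h]
    · simp only [pmRank, h, Bool.false_eq_true, if_false, PySem.List.index?]
      simp [PySem.Dict.get?_eq_none_iff_contains, h]
  | cons c t ih =>
    intro i d x
    rw [show pmRank (c :: t) i d = pmRank t (i+1) (d.setdefault c i) from rfl, ih]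
    by_cases hx : x = c
    · subst hx
      by_cases h : d.contains x = true
      · have hs : (d.get? x).isSome = true := by
          rw [← PySem.Dict.contains_eq_isSome_get?]; exact h
        obtain ⟨v, hv⟩ := Option.isSome_iff_exists.mp hs
        simp [PySem.Dict.contains_setdefault, h, PySem.Dict.get?_setdefault_self, hv]
      · have hn : d.get? x = none := (PySem.Dict.get?_eq_none_iff_contains d x).mpr (by simpa using h)
        rw [PySem.List.index?_cons_self]
        simp [PySem.Dict.contains_setdefault, h, PySem.Dict.get?_setdefault_self, hn]
    · have hne : (x == c) = false := by simp [hx]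
      rw [PySem.List.index?_cons_of_ne t (Ne.symm hx)]
      by_cases h : d.contains x = true
      · simp [PySem.Dict.contains_setdefault, hne, h, PySem.Dict.get?_setdefault_of_ne d i hx]
      · simp only [PySem.Dict.contains_setdefault, hne, h, Bool.false_or, Bool.false_eq_true,
          if_false, Option.map_map]
        congr 1
        funext j
        simp; omega

theorem pmRank_mem_keys (L : List String) : ∀ (i : Nat) (d : PySem.Dict String Nat) (x : String),
    x ∈ (pmRank L i d).keys ↔ x ∈ d.keys ∨ x ∈ L := by
  induction L with
  | nil => intro i d x; simp [pmRank]
  | cons c t ih =>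
    intro i d x
    rw [show pmRank (c :: t) i d = pmRank t (i+1) (d.setdefault c i) from rfl, ih]
    rw [PySem.Dict.keys_setdefault]
    by_cases h : d.contains c = true
    · have hc : c ∈ d.keys := (PySem.Dict.contains_iff_mem_keys d c).mp h
      simp only [h, if_true, List.mem_cons]
      constructor
      · rintro (hk | ht) <;> tauto
      · rintro (hk | rfl | ht) <;> tauto
    · simp only [h, Bool.false_eq_true, if_false, List.mem_append, List.mem_cons]
      tauto

theorem ofList_append_singleton (P : List String) (c : String) :
    PySem.Set.ofList (P ++ [c]) = PySem.Set.add (PySem.Set.ofList P) c := by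
  simp [PySem.Set.ofList_eq_foldl, List.foldl_append]

theorem pmLoopA_iff (pd : PySem.Dict String (List String)) (L : List String) :
    ∀ (P : List String), pmLoopA pd L (PySem.Set.ofList P) = true ↔
      ∀ (i : Nat) (h : i < L.length) (ps : List String), pd.get? L[i] = some ps →
        ∀ p ∈ ps, p ∈ P ++ L.take i := by
  induction L with
  | nil => intro P; simp [pmLoopA]
  | cons c t ih =>
    intro P
    rw [show pmLoopA pd (c :: t) (PySem.Set.ofList P) =
      (match pd.get? c with
       | some ps =>
         if ps.all (fun p => PySem.Set.contains (PySem.Set.ofList P) p)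
         then pmLoopA pd t (PySem.Set.add (PySem.Set.ofList P) c)
         else false
       | none => pmLoopA pd t (PySem.Set.add (PySem.Set.ofList P) c)) from rfl]
    rw [← ofList_append_singleton]
    cases hc : pd.get? c with
    | none =>
      rw [ih (P ++ [c])]
      constructor
      · intro H i h ps hps p hp
        match i, h with
        | 0, h => rw [List.getElem_cons_zero] at hps; rw [hc] at hps; cases hps
        | (j+1), h =>
          rw [List.getElem_cons_succ] at hps
          have := H j (by simpa using h) ps hps p hp
          simp only [List.mem_append, List.mem_cons] at this ⊢
          simp only [List.take_succ_cons, List.mem_cons] at ⊢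
          tauto
      · intro H j h ps hps p hp
        have := H (j+1) (by simpa using h) ps (by simpa using hps) p hp
        simp only [List.take_succ_cons, List.mem_append, List.mem_cons] at this ⊢
        tauto
    | some ps0 =>
      dsimp only
      by_cases hall : ps0.all (fun p => PySem.Set.contains (PySem.Set.ofList P) p) = true
      · rw [if_pos hall, ih (P ++ [c])]
        have hmem : ∀ p ∈ ps0, p ∈ P := by
          intro p hp
          have := (List.all_eq_true.mp hall) p hp
          rw [PySem.Set.contains_iff, PySem.Set.mem_ofList] at this
          exact this
        constructor
        · intro H i h ps hps p hp
          match i, h with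
          | 0, h =>
            rw [List.getElem_cons_zero, hc] at hps
            cases hps
            simpa using hmem p hp
          | (j+1), h =>
            rw [List.getElem_cons_succ] at hps
            have := H j (by simpa using h) ps hps p hp
            simp only [List.take_succ_cons, List.mem_append, List.mem_cons] at this ⊢
            tauto
        · intro H j h ps hps p hp
          have := H (j+1) (by simpa using h) ps (by simpa using hps) p hp
          simp only [List.take_succ_cons, List.mem_append, List.mem_cons] at this ⊢
          tauto
      · rw [if_neg hall]
        simp only [Bool.false_eq_true, false_iff]
        intro H
        apply hall
        rw [List.all_eq_true]
        intro p hp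
        have := H 0 (by simp) ps0 (by simpa using hc) p hp
        rw [PySem.Set.contains_iff, PySem.Set.mem_ofList]
        simpa using this

theorem checkB_iff (pd : PySem.Dict String (List String)) (L : List String) :
    ((pmRank L 0 PySem.Dict.empty).keys.all (fun c =>
       match pd.get? c with
       | some ps => ps.all (fun p => (pmRank L 0 PySem.Dict.empty).contains p &&
           decide ((pmRank L 0 PySem.Dict.empty).getD p 0 < (pmRank L 0 PySem.Dict.empty).getD c 0))
       | none => true)) = true ↔
      ∀ c ∈ L, ∀ (ps : List String), pd.get? c = some ps →
        ∀ p ∈ ps, ∃ j k, PySem.List.index? L p = some j ∧ PySem.List.index? L c = some k ∧ j < k := by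
  have hget : ∀ x, (pmRank L 0 PySem.Dict.empty).get? x = PySem.List.index? L x := by
    intro x
    rw [pmRank_get?]
    simp [PySem.Dict.contains_empty]
  have hkeys : ∀ x, x ∈ (pmRank L 0 PySem.Dict.empty).keys ↔ x ∈ L := by
    intro x; rw [pmRank_mem_keys]; simp [PySem.Dict.keys_empty]
  rw [List.all_eq_true]
  constructor
  · intro H c hcL ps hps p hp
    have hf := H c ((hkeys c).mpr hcL)
    rw [hps] at hf
    have hpp := (List.all_eq_true.mp hf) p hp
    obtain ⟨k, hk⟩ := Option.isSome_iff_exists.mp ((PySem.List.index?_isSome_iff L c).mpr hcL)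
    cases hjo : PySem.List.index? L p with
    | none =>
      rw [Bool.and_eq_true, PySem.Dict.contains_eq_isSome_get?, hget] at hpp
      rw [hjo] at hpp
      simp at hpp
    | some j =>
      refine ⟨j, k, rfl, hk, ?_⟩
      rw [Bool.and_eq_true, decide_eq_true_iff] at hpp
      rw [PySem.Dict.getD_eq_get?_getD, PySem.Dict.getD_eq_get?_getD, hget, hget, hjo, hk] at hpp
      simpa using hpp.2
  · intro H c hck
    have hcL := (hkeys c).mp hck
    cases hps : pd.get? c with
    | none => rfl
    | some ps =>
      dsimp only
      rw [List.all_eq_true]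
      intro p hp
      obtain ⟨j, k, hj, hk, hjk⟩ := H c hcL ps hps p hp
      rw [Bool.and_eq_true, decide_eq_true_iff]
      constructor
      · rw [PySem.Dict.contains_eq_isSome_get?, hget, hj]; rfl
      · rw [PySem.Dict.getD_eq_get?_getD, PySem.Dict.getD_eq_get?_getD, hget, hget, hj, hk]
        simpa using hjk

theorem bridge_iff (pd : PySem.Dict String (List String)) (L : List String) :
    (∀ (i : Nat) (h : i < L.length) (ps : List String), pd.get? L[i] = some ps →
        ∀ p ∈ ps, p ∈ ([] : List String) ++ L.take i) ↔
      (∀ c ∈ L, ∀ (ps : List String), pd.get? c = some ps →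
        ∀ p ∈ ps, ∃ j k, PySem.List.index? L p = some j ∧ PySem.List.index? L c = some k ∧ j < k) := by
  constructor
  · intro H c hcL ps hps p hp
    obtain ⟨k, hk⟩ := Option.isSome_iff_exists.mp ((PySem.List.index?_isSome_iff L c).mpr hcL)
    obtain ⟨hklen, hLk, _⟩ := PySem.List.getElem_of_index?_eq_some hk
    have hmem : p ∈ L.take k := by
      have := H k hklen ps (by rw [hLk]; exact hps) p hp
      simpa using this
    obtain ⟨m, hm, hLm⟩ := List.mem_take_iff_getElem.mp hmem
    have hpL : p ∈ L := by
      rw [← hLm]; exact List.getElem_mem _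
    obtain ⟨j, hj⟩ := Option.isSome_iff_exists.mp ((PySem.List.index?_isSome_iff L p).mpr hpL)
    obtain ⟨hjlen, hLj, hjfirst⟩ := PySem.List.getElem_of_index?_eq_some hj
    refine ⟨j, k, hj, hk, ?_⟩
    -- j is the FIRST index of p, m an index of p with m < k, so j ≤ m < k
    by_contra hcon
    have hkj : k ≤ j := Nat.le_of_not_lt hcon
    have hmk : m < min k L.length := hm
    have hmltj : m < j := by omega
    exact hjfirst m hmltj hLm
  · intro H i hi ps hps p hp
    have hcL : L[i] ∈ L := List.getElem_mem _
    obtain ⟨j, k, hj, hk, hjk⟩ := H L[i] hcL ps hps p hp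
    obtain ⟨hklen, hLk, hkfirst⟩ := PySem.List.getElem_of_index?_eq_some hk
    obtain ⟨hjlen, hLj, _⟩ := PySem.List.getElem_of_index?_eq_some hj
    have hki : k ≤ i := by
      by_contra hcon
      exact hkfirst i (Nat.lt_of_not_le hcon) rfl
    have hjlt : j < i := by omega
    simp only [List.nil_append]
    rw [List.mem_take_iff_getElem]
    exact ⟨j, by omega, hLj⟩

-- ===== VERDICT (by name: the statement is the Claim_ definition above) =====
theorem prerequisites_met_spec : Claim_equal_prerequisites_met := by
  intro schedule prerequisites _
  unfold Spec_prerequisites_met prerequisites_met prerequisites_met_alt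
  rw [Bool.eq_iff_iff]
  have h0 : (PySem.Set.empty : PySem.Set String) = PySem.Set.ofList [] := rfl
  rw [h0]
  exact ((pmLoopA_iff (PySem.Dict.ofList prerequisites) (pmCourses schedule) []).trans
    ((bridge_iff (PySem.Dict.ofList prerequisites) (pmCourses schedule)).trans
      (checkB_iff (PySem.Dict.ofList prerequisites) (pmCourses schedule)).symm))
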